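-- pv_equiv track=rewrite | github.com/mariusz-tang/Advent-of-Code-2023 | Day 13/solution.py | _has_reflection
-- ===== SOURCE A (Python) =====
-- def _has_reflection(index, lines):
--     top = index
--     bottom = index + 1
--     height = len(lines)
--     while top >= 0 and bottom < height:
--         if lines[top] != lines[bottom]:
--             return False
--         top -= 1
--         bottom += 1
--     return True
-- ===== SOURCE B (Python) =====
-- def _has_reflection(index, lines):
--     height = len(lines)
--     k = min(index + 1, height - index - 1)
--     if k <= 0:
--         return True
--     return lines[index - k + 1:index + 1][::-1] == lines[index + 1:index + 1 + k]
-- ===== Notes on version B (the rewrite author's own statement) =====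
-- stated objective: simpler
-- what changed: Replaces the incremental two-pointer outward-expansion while-loop with a closed-form reflection depth k and a single equality test between the reversed top slice and the bottom slice.
import Mathlib
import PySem

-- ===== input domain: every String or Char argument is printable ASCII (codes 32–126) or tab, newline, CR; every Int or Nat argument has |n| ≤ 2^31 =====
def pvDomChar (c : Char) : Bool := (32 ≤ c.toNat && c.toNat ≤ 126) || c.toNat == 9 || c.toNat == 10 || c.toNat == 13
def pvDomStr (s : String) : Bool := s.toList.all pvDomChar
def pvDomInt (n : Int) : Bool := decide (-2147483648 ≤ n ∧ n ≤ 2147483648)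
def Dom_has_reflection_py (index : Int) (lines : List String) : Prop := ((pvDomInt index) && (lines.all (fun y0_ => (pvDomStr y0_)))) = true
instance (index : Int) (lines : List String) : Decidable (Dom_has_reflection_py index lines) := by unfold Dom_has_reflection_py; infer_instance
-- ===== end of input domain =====

-- B replaces A's two-pointer outward-expansion loop by a closed-form depth k and one
-- reversed-slice equality test; objective: simpler.

-- ===== PORT A =====
-- the while-loop of _has_reflection, state (top, bottom)
def hasReflLoop (lines : List String) (top bottom : Int) : Bool :=
  if _h : 0 ≤ top ∧ bottom < (lines.length : Int) then
    if PySem.List.pyGet? lines top ≠ PySem.List.pyGet? lines bottom then false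
    else hasReflLoop lines (top - 1) (bottom + 1)
  else true
termination_by ((lines.length : Int) - bottom).toNat
decreasing_by omega

def has_reflection_py (index : Int) (lines : List String) : Bool :=
  hasReflLoop lines index (index + 1)

-- ===== PORT B =====
def has_reflection_py_alt (index : Int) (lines : List String) : Bool :=
  let height : Int := lines.length
  let k : Int := min (index + 1) (height - index - 1)
  if k ≤ 0 then true
  else
    (PySem.List.slice lines (some (index - k + 1)) (some (index + 1))).reverse
      == PySem.List.slice lines (some (index + 1)) (some (index + 1 + k))

-- ===== PRECONDITION & SPEC =====
def Spec_has_reflection_py (index : Int) (lines : List String) (out : Bool) : Prop := out = has_reflection_py_alt index lines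
instance (index : Int) (lines : List String) (out : Bool) : Decidable (Spec_has_reflection_py index lines out) := by unfold Spec_has_reflection_py; infer_instance

-- ===== CLAIM (what is proved, stated in full; the proofs are below) =====
def Claim_equal_has_reflection_py : Prop := ∀ (index : Int) (lines : List String), Dom_has_reflection_py index lines → Spec_has_reflection_py index lines (has_reflection_py index lines)

-- ===== LEMMAS AND PROOFS =====

-- the loop computes exactly the reversed-slice comparison at reflection depth min(top+1, len-bottom)
theorem loop_eq_slices (lines : List String) (top bottom : Int)
    (hb0 : 0 ≤ bottom) (hbn : bottom ≤ (lines.length : Int)) (htb : top < bottom)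
    (hm0 : 0 ≤ min (top + 1) ((lines.length : Int) - bottom)) :
    hasReflLoop lines top bottom =
      ((PySem.List.slice lines (some (top - min (top + 1) ((lines.length : Int) - bottom) + 1)) (some (top + 1))).reverse
        == PySem.List.slice lines (some bottom) (some (bottom + min (top + 1) ((lines.length : Int) - bottom)))) := by
  rw [hasReflLoop]
  by_cases h : 0 ≤ top ∧ bottom < (lines.length : Int)
  · rw [dif_pos h]
    obtain ⟨ht0, hbl⟩ := h
    set n := lines.length with hn
    set m : Int := min (top + 1) ((n : Int) - bottom) with hmdef
    have hm1 : 1 ≤ m := by omega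
    have hmt : m ≤ top + 1 := by omega
    -- Nat shadows of the Int state
    obtain ⟨M', hM'⟩ : ∃ M' : Nat, m = (M' : Int) + 1 := ⟨(m - 1).toNat, by omega⟩
    obtain ⟨T, hT⟩ : ∃ T : Nat, top = (T : Int) := ⟨top.toNat, by omega⟩
    obtain ⟨B, hB⟩ : ∃ B : Nat, bottom = (B : Int) := ⟨bottom.toNat, by omega⟩
    have hTn : T < n := by omega
    have hBn : B < n := by omega
    -- the two in-range element accesses
    have hgT : PySem.List.pyGet? lines top = some lines[T] := by
      rw [hT, PySem.List.pyGet?_natCast, List.getElem?_eq_getElem hTn]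
    have hgB : PySem.List.pyGet? lines bottom = some lines[B] := by
      rw [hB, PySem.List.pyGet?_natCast, List.getElem?_eq_getElem hBn]
    -- rewrite both slices into drop/take form and peel one element off each
    have e1 : top - m + 1 = ((T - M' : Nat) : Int) := by omega
    have e2 : top + 1 = ((T + 1 : Nat) : Int) := by omega
    have e3 : bottom + m = ((B + (M' + 1) : Nat) : Int) := by omega
    have hTop : PySem.List.slice lines (some (top - m + 1)) (some (top + 1))
        = (lines.drop (T - M')).take M' ++ [lines[T]] := by
      rw [e1, e2, PySem.List.slice_natCast]
      have e4 : T + 1 - (T - M') = M' + 1 := by omega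
      rw [e4, List.take_add_one, List.getElem?_drop]
      have e5 : T - M' + M' = T := by omega
      rw [e5, List.getElem?_eq_getElem hTn]
      rfl
    have hBot : PySem.List.slice lines (some bottom) (some (bottom + m))
        = lines[B] :: (lines.drop (B + 1)).take M' := by
      rw [e3, hB, PySem.List.slice_natCast]
      have e6 : B + (M' + 1) - B = M' + 1 := by omega
      rw [e6, List.drop_eq_getElem_cons hBn, List.take_succ_cons]
    rw [hTop, hBot, List.reverse_append, List.reverse_singleton, List.singleton_append,
      List.cons_beq_cons]
    -- the tail comparison is the recursive call, by the induction hypothesis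
    have hrec := loop_eq_slices lines (top - 1) (bottom + 1) (by omega) (by omega) (by omega)
      (by omega)
    have hm' : min (top - 1 + 1) ((n : Int) - (bottom + 1)) = m - 1 := by omega
    rw [hm'] at hrec
    have e7 : top - 1 - (m - 1) + 1 = ((T - M' : Nat) : Int) := by omega
    have e8 : top - 1 + 1 = ((T : Nat) : Int) := by omega
    have e10 : bottom + 1 + (m - 1) = ((B + 1 + M' : Nat) : Int) := by omega
    have e9 : bottom + 1 = ((B + 1 : Nat) : Int) := by omega
    rw [e7, e8, e10, e9, PySem.List.slice_natCast, PySem.List.slice_natCast] at hrec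
    have e11 : T - (T - M') = M' := by omega
    have e12 : B + 1 + M' - (B + 1) = M' := by omega
    rw [e11, e12] at hrec
    by_cases hEq : lines[T] = lines[B]
    · rw [if_neg (by simp [hgT, hgB, hEq]), e9, hrec, hEq]
      simp
    · rw [if_pos (by simp [hgT, hgB, hEq])]
      have : (lines[T] == lines[B]) = false := by simp [hEq]
      rw [this, Bool.false_and]
  · rw [dif_neg h]
    set m : Int := min (top + 1) ((lines.length : Int) - bottom) with hmdef
    have hm : m = 0 := by omega
    have e1 : top - m + 1 = top + 1 := by omega
    have e2 : bottom + m = bottom := by omega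
    have h1 : (PySem.List.slice lines (some (top - m + 1)) (some (top + 1))).length = 0 := by
      rw [e1, PySem.List.length_slice]
      exact Nat.sub_self _
    have h2 : (PySem.List.slice lines (some bottom) (some (bottom + m))).length = 0 := by
      rw [e2, PySem.List.length_slice]
      exact Nat.sub_self _
    rw [List.eq_nil_of_length_eq_zero h1, List.eq_nil_of_length_eq_zero h2]
    rfl
termination_by ((lines.length : Int) - bottom).toNat
decreasing_by omega

theorem has_reflection_py_spec : Claim_equal_has_reflection_py := by
  intro index lines _
  unfold Spec_has_reflection_py has_reflection_py has_reflection_py_alt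
  set n := lines.length with hn
  set k : Int := min (index + 1) ((n : Int) - index - 1) with hk
  by_cases hk0 : k ≤ 0
  · rw [if_pos hk0, hasReflLoop, dif_neg (by omega)]
  · rw [if_neg hk0]
    have hrec := loop_eq_slices lines index (index + 1) (by omega) (by omega) (by omega)
      (by omega)
    have hm : min (index + 1) ((n : Int) - (index + 1)) = k := by omega
    rw [hm] at hrec
    exact hrec
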